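-- pv_equiv track=rewrite | github.com/Miragaia/FP | Exercicios FP/positionDifferenceFirstLastLasgest.py.py | positionDifferenceFirstLastLargest
-- ===== SOURCE A (Python) =====
-- def positionDifferenceFirstLastLargest(arr):
--    max = arr[0]
--    for n in arr:
--        if n > max:
--            max = n
--
--    maxes =[]
--    for index in range(len(arr)):
--        if arr[index] == max:
--            maxes.append(index)
--    return maxes[-1] - maxes[0]
-- ===== SOURCE B (Python) =====
-- def positionDifferenceFirstLastLargest(arr):
--     m = arr[0]
--     first = last = 0
--     for i, v in enumerate(arr):
--         if v > m:
--             m = v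
--             first = last = i
--         elif v == m:
--             last = i
--     return last - first
-- ===== Notes on version B (the rewrite author's own statement) =====
-- stated objective: simpler
-- what changed: Replaces A's two passes (running-max loop, then an index loop collecting the list of all positions of the max) by one enumerate pass that maintains the running max together with just the first and last index where it occurs; no index list is built.
import Mathlib
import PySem

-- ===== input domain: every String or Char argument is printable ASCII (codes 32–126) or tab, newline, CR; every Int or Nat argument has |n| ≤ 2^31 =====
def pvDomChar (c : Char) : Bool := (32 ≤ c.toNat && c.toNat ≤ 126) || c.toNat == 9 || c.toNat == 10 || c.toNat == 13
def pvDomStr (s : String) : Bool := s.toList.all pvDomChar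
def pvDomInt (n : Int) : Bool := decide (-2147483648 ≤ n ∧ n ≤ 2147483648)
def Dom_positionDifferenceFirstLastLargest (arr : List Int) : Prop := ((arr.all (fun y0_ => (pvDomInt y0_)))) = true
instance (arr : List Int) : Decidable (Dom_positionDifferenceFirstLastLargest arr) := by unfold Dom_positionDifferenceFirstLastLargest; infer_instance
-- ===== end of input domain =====

-- B fuses A's two passes into one enumerate pass keeping only the running max and the
-- first/last index where it occurs (simpler: no index list is built); equal on nonempty lists.

-- ===== PORT A =====
def positionDifferenceFirstLastLargest (arr : List Int) : Int :=
  let mx := arr.foldl (fun m n => if n > m then n else m) (PySem.List.pyGetD arr 0 0)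
  let maxes : List Int :=
    (PySem.List.pyRange 0 (arr.length : Int) 1).foldl
      (fun acc index => if PySem.List.pyGetD arr index 0 = mx then acc ++ [index] else acc) []
  PySem.List.pyGetD maxes (-1) 0 - PySem.List.pyGetD maxes 0 0

-- ===== PORT B =====
def positionDifferenceFirstLastLargest_alt (arr : List Int) : Int :=
  let st := (PySem.List.enumerate arr 0).foldl
    (fun (s : Int × Int × Int) p =>
      if p.2 > s.1 then (p.2, p.1, p.1)
      else if p.2 = s.1 then (s.1, s.2.1, p.1)
      else s)
    (PySem.List.pyGetD arr 0 0, 0, 0)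
  st.2.2 - st.2.1

-- ===== PRECONDITION & SPEC =====
-- Pre_ excludes only the empty list, on which both Pythons raise IndexError reading the first element.
def Pre_positionDifferenceFirstLastLargest (arr : List Int) : Prop := arr ≠ []
instance (arr : List Int) : Decidable (Pre_positionDifferenceFirstLastLargest arr) := by unfold Pre_positionDifferenceFirstLastLargest; infer_instance
def pvWitness_positionDifferenceFirstLastLargest : List Int := [3, 1, 3]

def Spec_positionDifferenceFirstLastLargest (arr : List Int) (out : Int) : Prop := out = positionDifferenceFirstLastLargest_alt arr
instance (arr : List Int) (out : Int) : Decidable (Spec_positionDifferenceFirstLastLargest arr out) := by unfold Spec_positionDifferenceFirstLastLargest; infer_instance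

-- ===== CLAIM (what is proved, stated in full; the proofs are below) =====
def Claim_equal_positionDifferenceFirstLastLargest : Prop := ∀ (arr : List Int), Dom_positionDifferenceFirstLastLargest arr → Pre_positionDifferenceFirstLastLargest arr → Spec_positionDifferenceFirstLastLargest arr (positionDifferenceFirstLastLargest arr)

-- ===== LEMMAS AND PROOFS =====

theorem pv_getD_lt (a : List Int) (v d i : Int) (h0 : 0 ≤ i) (h : i < (a.length:Int)) :
    PySem.List.pyGetD (a++[v]) i d = PySem.List.pyGetD a i d := by
  rw [PySem.List.pyGetD_eq_getElem (h0 := h0) (h1 := by simp; omega),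
      PySem.List.pyGetD_eq_getElem (h0 := h0) (h1 := h)]
  exact List.getElem_append_left (by omega)

theorem pv_main (x : Int) (xs : List Int) :
    (∀ y ∈ x :: xs, y ≤ (x :: xs).foldl (fun m n => if n > m then n else m) x) ∧
    ((PySem.List.pyRange 0 ((x :: xs).length : Int) 1).foldl
        (fun acc index => if PySem.List.pyGetD (x :: xs) index 0 =
            (x :: xs).foldl (fun m n => if n > m then n else m) x then acc ++ [index] else acc) [] ≠ []) ∧
    (PySem.List.enumerate (x :: xs) 0).foldl
      (fun (s : Int × Int × Int) p =>
        if p.2 > s.1 then (p.2, p.1, p.1)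
        else if p.2 = s.1 then (s.1, s.2.1, p.1)
        else s) (x, 0, 0) =
      (((x :: xs).foldl (fun m n => if n > m then n else m) x),
       ((PySem.List.pyRange 0 ((x :: xs).length : Int) 1).foldl
          (fun acc index => if PySem.List.pyGetD (x :: xs) index 0 =
              (x :: xs).foldl (fun m n => if n > m then n else m) x then acc ++ [index] else acc) []).headD 0,
       PySem.List.pyGetD
         ((PySem.List.pyRange 0 ((x :: xs).length : Int) 1).foldl
            (fun acc index => if PySem.List.pyGetD (x :: xs) index 0 =
                (x :: xs).foldl (fun m n => if n > m then n else m) x then acc ++ [index] else acc) []) (-1) 0) := by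
  induction xs using List.reverseRecOn with
  | nil =>
      refine ⟨?_, ?_, ?_⟩ <;>
        simp [PySem.List.enumerate_cons, PySem.List.enumerate_nil,
              show PySem.List.pyRange (0:Int) 1 1 = [0] from by decide,
              show ∀ k : Int, PySem.List.pyGetD [k] (-1) 0 = k from fun _ => rfl]
  | append_singleton ys v ih =>
      obtain ⟨ihb, ihne, ihst⟩ := ih
      rw [show x :: (ys ++ [v]) = (x :: ys) ++ [v] from rfl]
      set a := x :: ys with ha
      set mx := a.foldl (fun m n => if n > m then n else m) x with hmx
      have hlen : (((a ++ [v]).length : Nat) : Int) = (a.length : Int) + 1 := by simp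
      have hfold : (a ++ [v]).foldl (fun m n => if n > m then n else m) x
          = if v > mx then v else mx := by
        rw [List.foldl_append]; rfl
      have hrange : PySem.List.pyRange 0 (((a ++ [v]).length : Nat) : Int) 1
          = PySem.List.pyRange 0 (a.length : Int) 1 ++ [(a.length : Int)] := by
        rw [hlen, PySem.List.pyRange_one_succ_right (by positivity)]
      have hpref : ∀ (mv : Int) (acc : List Int),
          (PySem.List.pyRange 0 (a.length:Int) 1).foldl
            (fun acc i => if PySem.List.pyGetD (a ++ [v]) i 0 = mv then acc ++ [i] else acc) acc
          = (PySem.List.pyRange 0 (a.length:Int) 1).foldl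
            (fun acc i => if PySem.List.pyGetD a i 0 = mv then acc ++ [i] else acc) acc := by
        intro mv acc
        apply PySem.List.foldl_congr_mem
        intro acc i hi
        obtain ⟨h1, h2⟩ := (PySem.List.mem_pyRange_one).1 hi
        rw [pv_getD_lt a v 0 i h1 h2]
      have hlast : ∀ (z : List Int) (mv : Int),
          List.foldl (fun acc i => if PySem.List.pyGetD (a ++ [v]) i 0 = mv then acc ++ [i] else acc)
            z [(a.length:Int)] = if v = mv then z ++ [(a.length:Int)] else z := by
        intro z mv; simp
      have hblast : ∀ (s : Int × Int × Int),
          List.foldl (fun (s : Int × Int × Int) p =>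
              if p.2 > s.1 then (p.2, p.1, p.1) else if p.2 = s.1 then (s.1, s.2.1, p.1) else s)
            s [((a.length:Int), v)]
          = if v > s.1 then (v, (a.length:Int), (a.length:Int))
            else if v = s.1 then (s.1, s.2.1, (a.length:Int)) else s := by
        intro s; simp
      have hheadD : ∀ (l : List Int) (k : Int), l ≠ [] → (l ++ [k]).headD 0 = l.headD 0 := by
        intro l k hl; cases l with
        | nil => exact absurd rfl hl
        | cons b bs => rfl
      have henum : PySem.List.enumerate (a ++ [v]) 0
          = PySem.List.enumerate a 0 ++ [((a.length:Int), v)] := by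
        rw [PySem.List.enumerate_append]
        simp [PySem.List.enumerate_cons, PySem.List.enumerate_nil]
      rw [hfold, hrange, henum]
      by_cases hv : v > mx
      · -- new strict max
        rw [if_pos hv]
        have hzstep : ∀ (acc : List Int) (i : Int), i ∈ PySem.List.pyRange 0 (a.length:Int) 1 →
            (if PySem.List.pyGetD a i 0 = v then acc ++ [i] else acc) = acc := by
          intro acc i hi
          obtain ⟨h1, h2⟩ := (PySem.List.mem_pyRange_one).1 hi
          rw [if_neg]
          intro he
          have hm : PySem.List.pyGetD a i 0 ∈ a :=
            PySem.List.pyGetD_mem a 0 ⟨by omega, by omega⟩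
          have := ihb _ hm
          rw [he] at this; omega
        have hzero : (PySem.List.pyRange 0 (a.length:Int) 1).foldl
            (fun acc i => if PySem.List.pyGetD a i 0 = v then acc ++ [i] else acc) ([]:List Int) = [] := by
          rw [PySem.List.foldl_congr_mem _ _ (fun acc _ => acc) _ hzstep, PySem.List.foldl_ignore]
        refine ⟨?_, ?_, ?_⟩
        · intro y hy
          rcases List.mem_append.1 hy with h | h
          · exact le_of_lt (lt_of_le_of_lt (ihb _ h) hv)
          · simp at h; omega
        · rw [List.foldl_append, hpref, hzero, hlast, if_pos rfl]
          simp
        · rw [List.foldl_append, List.foldl_append, hpref, hzero, hlast, if_pos rfl, ihst, hblast,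
              if_pos hv]
          simp [show ∀ k : Int, PySem.List.pyGetD [k] (-1) 0 = k from fun _ => rfl]
      · -- max unchanged
        rw [if_neg hv]
        by_cases hveq : v = mx
        · refine ⟨?_, ?_, ?_⟩
          · intro y hy
            rcases List.mem_append.1 hy with h | h
            · exact ihb _ h
            · simp at h; omega
          · rw [List.foldl_append, hpref, hlast, if_pos hveq]
            simp
          · rw [List.foldl_append, List.foldl_append, hpref, hlast, if_pos hveq, ihst, hblast,
                if_neg hv, if_pos hveq]
            refine Prod.ext rfl (Prod.ext ?_ ?_)
            · exact (hheadD _ _ ihne).symm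
            · exact (PySem.List.pyGetD_neg_one_append_singleton _ _ _).symm
        · refine ⟨?_, ?_, ?_⟩
          · intro y hy
            rcases List.mem_append.1 hy with h | h
            · exact ihb _ h
            · simp at h; omega
          · rw [List.foldl_append, hpref, hlast, if_neg hveq]
            exact ihne
          · rw [List.foldl_append, List.foldl_append, hpref, hlast, if_neg hveq, ihst, hblast,
                if_neg hv, if_neg hveq]

-- ===== VERDICT (by name: the statement is the Claim_ definition above) =====
theorem positionDifferenceFirstLastLargest_spec : Claim_equal_positionDifferenceFirstLastLargest := by
  intro arr hdom hpre
  unfold Spec_positionDifferenceFirstLastLargest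
  cases arr with
  | nil => exact absurd rfl hpre
  | cons x xs =>
    obtain ⟨-, -, hst⟩ := pv_main x xs
    simp only [positionDifferenceFirstLastLargest, positionDifferenceFirstLastLargest_alt,
      PySem.List.pyGetD_zero_cons]
    rw [hst]
    have hhd : ∀ (l : List Int), PySem.List.pyGetD l 0 0 = l.headD 0 := by
      intro l; cases l <;> simp [PySem.List.pyGetD_zero]
    rw [hhd]
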